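-- pv_equiv track=rewrite | github.com/ASEbrahim/stratos | backend/routes/agent_tools.py | _fuzzy_find_category
-- ===== SOURCE A (Python) =====
-- def _fuzzy_find_category(categories, query):
--     q = query.lower().strip()
--     if not q:
--         return None
--     for c in categories:
--         if c.get("id", "").lower() == q or c.get("label", "").lower() == q:
--             return c
--     for c in categories:
--         if q in c.get("label", "").lower() or q in c.get("id", "").lower():
--             return c
--         if c.get("label", "").lower() in q or c.get("id", "").lower() in q:
--             return c
--     return None
-- ===== SOURCE B (Python) =====
-- def _fuzzy_find_category(categories, query):
--     q = query.lower().strip()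
--     if not q:
--         return None
--     fallback = None
--     for c in categories:
--         cid = c.get("id", "").lower()
--         lab = c.get("label", "").lower()
--         if cid == q or lab == q:
--             return c
--         if fallback is None and (q in lab or q in cid or lab in q or cid in q):
--             fallback = c
--     return fallback
-- ===== Notes on version B (the rewrite author's own statement) =====
-- stated objective: alternative
-- what changed: Replaces A's two sequential passes (exact-match pass, then substring pass) with a single pass that returns on an exact match and remembers the first substring match in a fallback variable.
import Mathlib
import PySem

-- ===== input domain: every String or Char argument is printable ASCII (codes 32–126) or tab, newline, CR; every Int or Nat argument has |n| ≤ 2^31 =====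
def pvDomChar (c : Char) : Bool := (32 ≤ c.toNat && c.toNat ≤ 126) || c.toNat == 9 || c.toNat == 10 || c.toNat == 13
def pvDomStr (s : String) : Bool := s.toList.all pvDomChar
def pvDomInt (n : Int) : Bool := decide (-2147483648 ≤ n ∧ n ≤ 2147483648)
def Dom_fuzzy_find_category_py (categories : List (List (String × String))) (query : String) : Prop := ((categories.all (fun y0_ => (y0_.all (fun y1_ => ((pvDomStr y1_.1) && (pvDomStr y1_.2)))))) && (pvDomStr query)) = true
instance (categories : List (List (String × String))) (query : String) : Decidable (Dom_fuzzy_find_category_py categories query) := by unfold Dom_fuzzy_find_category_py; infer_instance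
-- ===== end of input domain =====

-- B replaces A's two sequential passes with one pass that returns on an exact match
-- and keeps the first substring match in a fallback variable (alternative decomposition).

-- ===== PORT A =====
-- c.get(k, "").lower()
def pvField (c : List (String × String)) (k : String) : String :=
  PySem.Str.lower (PySem.Dict.getD (PySem.Dict.mk c) k "")

-- first loop of A: exact match on id or label
def pvExactLoop (q : String) : List (List (String × String)) → Option (List (String × String))
  | [] => none
  | c :: rest =>
    if pvField c "id" = q ∨ pvField c "label" = q then some c
    else pvExactLoop q rest

-- second loop of A: substring match, two branches in A's order
def pvSubLoop (q : String) : List (List (String × String)) → Option (List (String × String))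
  | [] => none
  | c :: rest =>
    if PySem.Str.isIn q (pvField c "label") || PySem.Str.isIn q (pvField c "id") then some c
    else if PySem.Str.isIn (pvField c "label") q || PySem.Str.isIn (pvField c "id") q then some c
    else pvSubLoop q rest

def fuzzy_find_category_py (categories : List (List (String × String))) (query : String) : Option (List (String × String)) :=
  let q := PySem.Str.strip (PySem.Str.lower query)
  if q = "" then none
  else
    match pvExactLoop q categories with
    | some c => some c
    | none => pvSubLoop q categories

-- ===== PORT B =====
-- single pass: return on exact match, remember first substring match in `fallback`
def pvScan (q : String) (fallback : Option (List (String × String))) :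
    List (List (String × String)) → Option (List (String × String))
  | [] => fallback
  | c :: rest =>
    let cid := pvField c "id"
    let lab := pvField c "label"
    if cid = q ∨ lab = q then some c
    else
      pvScan q
        (if fallback.isNone &&
            (PySem.Str.isIn q lab || PySem.Str.isIn q cid ||
             PySem.Str.isIn lab q || PySem.Str.isIn cid q)
         then some c else fallback) rest

def fuzzy_find_category_py_alt (categories : List (List (String × String))) (query : String) : Option (List (String × String)) :=
  let q := PySem.Str.strip (PySem.Str.lower query)
  if q = "" then none
  else pvScan q none categories

-- ===== PRECONDITION & SPEC =====
def Spec_fuzzy_find_category_py (categories : List (List (String × String))) (query : String) (out : Option (List (String × String))) : Prop := out = fuzzy_find_category_py_alt categories query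
instance (categories : List (List (String × String))) (query : String) (out : Option (List (String × String))) : Decidable (Spec_fuzzy_find_category_py categories query out) := by unfold Spec_fuzzy_find_category_py; infer_instance

-- ===== CLAIM (what is proved, stated in full; the proofs are below) =====
def Claim_equal_fuzzy_find_category_py : Prop := ∀ (categories : List (List (String × String))) (query : String), Dom_fuzzy_find_category_py categories query → Spec_fuzzy_find_category_py categories query (fuzzy_find_category_py categories query)

-- ===== LEMMAS AND PROOFS =====
-- key invariant: the one-pass scan with fallback equals exact-pass-then-(fallback-or-substring-pass)
lemma pvScan_eq (q : String) (fb : Option (List (String × String)))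
    (l : List (List (String × String))) :
    pvScan q fb l =
      match pvExactLoop q l with
      | some c => some c
      | none => match fb with
                | some x => some x
                | none => pvSubLoop q l := by
  induction l generalizing fb with
  | nil => cases fb <;> rfl
  | cons c rest ih =>
    by_cases hex : pvField c "id" = q ∨ pvField c "label" = q
    · simp only [pvScan, pvExactLoop, if_pos hex]
    · simp only [pvScan, pvExactLoop, pvSubLoop, if_neg hex]
      rw [ih]
      cases fb <;>
        cases hA : PySem.Str.isIn q (pvField c "label") <;>
        cases hB : PySem.Str.isIn q (pvField c "id") <;>
        cases hC : PySem.Str.isIn (pvField c "label") q <;>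
        cases hD : PySem.Str.isIn (pvField c "id") q <;>
        cases pvExactLoop q rest <;> rfl

-- ===== VERDICT (by name: the statement is the Claim_ definition above) =====
theorem fuzzy_find_category_py_spec : Claim_equal_fuzzy_find_category_py := by
  intro categories query _
  unfold Spec_fuzzy_find_category_py fuzzy_find_category_py fuzzy_find_category_py_alt
  by_cases hq : PySem.Str.strip (PySem.Str.lower query) = ""
  · simp [hq]
  · simp only [if_neg hq]
    rw [pvScan_eq]
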